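-- pv_equiv track=rewrite | github.com/SST-Bappu/Regular-Progress | Problem Solving/leetcode/contest/LongestContegiousSegement.py | LongestContegiousSegment
-- ===== SOURCE A (Python) =====
-- def LongestContegiousSegment(s):
--     zeroes = ones = 0
--     i= 0
--     n = len(s)
--     while i<n:
--         z=o=0
--         if s[i]=='0':
--             while i<n and s[i]=='0':
--                 z+=1
--                 i+=1
--             zeroes = max(z,zeroes)
--         elif s[i]=='1':
--             while i<n and s[i]=='1':
--                 o+=1
--                 i+=1
--             ones= max(ones,o)
--     return ones>zeroes
-- ===== SOURCE B (Python) =====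
-- def LongestContegiousSegment(s):
--     ones = zeroes = run = 0
--     prev = ''
--     for ch in s:
--         run = run + 1 if ch == prev else 1
--         prev = ch
--         if ch == '1' and run > ones:
--             ones = run
--         if ch == '0' and run > zeroes:
--             zeroes = run
--     return ones > zeroes
-- ===== Notes on version B (the rewrite author's own statement) =====
-- stated objective: simpler
-- what changed: Replaces A's index-tracking outer while with two nested run-scanning whiles by a single linear for-loop that tracks the current run length and updates the per-character maxima in place.
import Mathlib
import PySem

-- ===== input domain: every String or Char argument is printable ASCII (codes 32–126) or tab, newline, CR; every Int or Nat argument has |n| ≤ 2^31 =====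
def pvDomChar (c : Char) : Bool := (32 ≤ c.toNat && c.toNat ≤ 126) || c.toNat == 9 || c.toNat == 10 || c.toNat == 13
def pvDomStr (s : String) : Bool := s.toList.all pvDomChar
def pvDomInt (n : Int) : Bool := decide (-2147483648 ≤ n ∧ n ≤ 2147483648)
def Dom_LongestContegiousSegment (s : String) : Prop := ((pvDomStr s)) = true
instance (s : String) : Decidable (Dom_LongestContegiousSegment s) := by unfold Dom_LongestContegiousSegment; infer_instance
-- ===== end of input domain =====

-- B is a single linear pass tracking the current run length, instead of A's index-tracking
-- outer while with nested run-scanning inner whiles; same O(n) cost, plainer code.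
-- A never raises but DIVERGES on any character other than '0'/'1' (the index never advances);
-- Pre_ restricts to binary strings, exactly the inputs on which A returns.

-- ===== PORT A =====
-- inner 'while i<n and s[i]==c: cnt+=1; i+=1' : length of the leading run of c
def pvRunLen (c : Char) : List Char → Nat
  | [] => 0
  | x :: xs => if x = c then pvRunLen c xs + 1 else 0

-- outer 'while i<n': the list is the suffix s[i:].  On a character that is neither '0' nor '1'
-- the Python loop never advances i (it diverges); Pre_ excludes those inputs, and here the
-- totalized port advances by one character (nothing is claimed there).
def pvLoopA (l : List Char) (zeroes ones : Int) : Int × Int :=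
  match l with
  | [] => (zeroes, ones)
  | c :: rest =>
    if c = '0' then
      pvLoopA (rest.drop (pvRunLen '0' rest)) (max ((pvRunLen '0' rest : Int) + 1) zeroes) ones
    else if c = '1' then
      pvLoopA (rest.drop (pvRunLen '1' rest)) zeroes (max ones ((pvRunLen '1' rest : Int) + 1))
    else
      pvLoopA rest zeroes ones
  termination_by l.length
  decreasing_by all_goals (simp; try omega)

def LongestContegiousSegment (s : String) : Bool :=
  let (zeroes, ones) := pvLoopA s.toList 0 0
  ones > zeroes

-- ===== PORT B =====
-- Python's prev starts as '' which never equals a one-character ch; ported as none (exact).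
def pvStepB (st : Option Char × Int × Int × Int) (ch : Char) : Option Char × Int × Int × Int :=
  let (prev, run, ones, zeroes) := st
  let run' := if some ch = prev then run + 1 else 1
  let ones' := if ch = '1' ∧ run' > ones then run' else ones
  let zeroes' := if ch = '0' ∧ run' > zeroes then run' else zeroes
  (some ch, run', ones', zeroes')

def LongestContegiousSegment_alt (s : String) : Bool :=
  let (_, _, ones, zeroes) := s.toList.foldl pvStepB (none, 0, 0, 0)
  ones > zeroes

-- ===== PRECONDITION & SPEC =====
-- Pre_ = binary strings: on any other string A's outer while never advances and A diverges.
def Pre_LongestContegiousSegment (s : String) : Prop :=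
  (s.toList.all fun c => c == '0' || c == '1') = true
instance (s : String) : Decidable (Pre_LongestContegiousSegment s) := by
  unfold Pre_LongestContegiousSegment; infer_instance

def pvWitness_LongestContegiousSegment : String := "01"

def Spec_LongestContegiousSegment (s : String) (out : Bool) : Prop := out = LongestContegiousSegment_alt s
instance (s : String) (out : Bool) : Decidable (Spec_LongestContegiousSegment s out) := by unfold Spec_LongestContegiousSegment; infer_instance

-- ===== CLAIM (what is proved, stated in full; the proofs are below) =====
def Claim_equal_LongestContegiousSegment : Prop := ∀ (s : String), Dom_LongestContegiousSegment s → Pre_LongestContegiousSegment s → Spec_LongestContegiousSegment s (LongestContegiousSegment s)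

-- ===== LEMMAS AND PROOFS =====

theorem pvRunLen_split (c : Char) (l : List Char) :
    l = List.replicate (pvRunLen c l) c ++ l.drop (pvRunLen c l) := by
  induction l with
  | nil => simp [pvRunLen]
  | cons x xs ih =>
    by_cases h : x = c
    · simp [pvRunLen, h, List.replicate_succ]
      exact ih
    · simp [pvRunLen, h]

theorem pvRunLen_drop_head (c : Char) (l : List Char) :
    ∀ d, (l.drop (pvRunLen c l)).head? = some d → d ≠ c := by
  induction l with
  | nil => simp [pvRunLen]
  | cons x xs ih =>
    by_cases h : x = c
    · simpa [pvRunLen, h] using ih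
    · intro d hd
      simp [pvRunLen, h] at hd
      subst hd
      exact h

theorem pvFoldB_replicate (k : Nat) (c : Char) (run ones zeroes : Int)
    (h1 : c = '1' → run ≤ ones) (h0 : c = '0' → run ≤ zeroes) :
    (List.replicate k c).foldl pvStepB (some c, run, ones, zeroes) =
      (some c, run + k,
        (if c = '1' ∧ run + k > ones then run + k else ones),
        (if c = '0' ∧ run + k > zeroes then run + k else zeroes)) := by
  induction k generalizing run ones zeroes with
  | zero =>
    have e1 : (if c = '1' ∧ run + (0:Nat) > ones then run + (0:Nat) else ones) = ones := by
      split_ifs with h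
      · exact absurd (h1 h.1) (by omega)
      · rfl
    have e0 : (if c = '0' ∧ run + (0:Nat) > zeroes then run + (0:Nat) else zeroes) = zeroes := by
      split_ifs with h
      · exact absurd (h0 h.1) (by omega)
      · rfl
    rw [e1, e0]
    simp
  | succ n ih =>
    rw [List.replicate_succ, List.foldl_cons]
    have hstep : pvStepB (some c, run, ones, zeroes) c =
        (some c, run + 1, (if c = '1' ∧ run + 1 > ones then run + 1 else ones),
          (if c = '0' ∧ run + 1 > zeroes then run + 1 else zeroes)) := by
      simp [pvStepB]
    rw [hstep]
    rw [ih (run + 1) _ _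
          (fun hc => by have := h1 hc; simp only [hc, true_and]; split_ifs <;> simp_all)
          (fun hc => by have := h0 hc; simp only [hc, true_and]; split_ifs <;> simp_all)]
    refine congrArg _ ?_
    refine Prod.ext (by push_cast; ring) (Prod.ext ?_ ?_)
    · by_cases hc : c = '1' <;> simp only [hc] <;> split_ifs <;> push_cast at * <;> simp_all <;> omega
    · by_cases hc : c = '0' <;> simp only [hc] <;> split_ifs <;> push_cast at * <;> simp_all <;> omega

theorem pvMain : ∀ n (l : List Char), l.length ≤ n →
    (∀ c ∈ l, c = '0' ∨ c = '1') →
    ∀ (prev : Option Char) (run ones zeroes : Int),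
    (∀ d, l.head? = some d → prev ≠ some d) →
    pvLoopA l zeroes ones =
      (let (_, _, o, z) := l.foldl pvStepB (prev, run, ones, zeroes); (z, o)) := by
  intro n
  induction n with
  | zero =>
    intro l hl _ prev run ones zeroes _
    have : l = [] := List.eq_nil_of_length_eq_zero (Nat.le_zero.mp hl)
    subst this
    simp [pvLoopA]
  | succ m ih =>
    intro l hl hbin prev run ones zeroes hprev
    match l, hl, hbin, hprev with
    | [], _, _, _ => simp [pvLoopA]
    | c :: rest, hl, hbin, hprev =>
      have hc : c = '0' ∨ c = '1' := hbin c (by simp)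
      have hrest := pvRunLen_split c rest
      set k := pvRunLen c rest with hk
      have hdroplen : (rest.drop k).length ≤ m := by
        simp only [List.length_drop]
        have : rest.length ≤ m := by simpa using hl
        omega
      have hbin' : ∀ d ∈ rest.drop k, d = '0' ∨ d = '1' := by
        intro d hd
        exact hbin d (List.mem_cons_of_mem c (List.mem_of_mem_drop hd))
      have hhead' : ∀ d, (rest.drop k).head? = some d → (some c : Option Char) ≠ some d := by
        intro d hd h
        exact pvRunLen_drop_head c rest d hd (Option.some.inj h).symm
      have hne : (some c = prev) = False := by
        simp only [eq_iff_iff, iff_false]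
        intro h
        exact hprev c rfl h.symm
      rcases hc with hc | hc
      · subst hc
        have hfold : (('0' : Char) :: rest).foldl pvStepB (prev, run, ones, zeroes) =
            (rest.drop k).foldl pvStepB
              (some '0', 1 + (k : Int), ones,
                (if 1 + (k : Int) > zeroes then 1 + (k : Int) else zeroes)) := by
          have hstep : pvStepB (prev, run, ones, zeroes) '0' =
              (some '0', 1, ones, (if (1:Int) > zeroes then 1 else zeroes)) := by
            simp [pvStepB, hne]
          rw [List.foldl_cons, hstep]
          conv_lhs => rw [hrest]
          rw [List.foldl_append,
            pvFoldB_replicate k '0' 1 ones (if (1:Int) > zeroes then 1 else zeroes)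
              (by intro h; exact absurd h (by decide))
              (by intro _; split_ifs <;> omega)]
          have hstate :
              ((some '0' : Option Char), 1 + (k : Int),
                (if ('0':Char) = '1' ∧ 1 + (k:Int) > ones then 1 + (k:Int) else ones),
                (if ('0':Char) = '0' ∧ 1 + (k:Int) > (if (1:Int) > zeroes then 1 else zeroes)
                  then 1 + (k:Int) else (if (1:Int) > zeroes then 1 else zeroes))) =
              ((some '0' : Option Char), 1 + (k : Int), ones,
                (if 1 + (k:Int) > zeroes then 1 + (k:Int) else zeroes)) := by
            have eo : (if ('0':Char) = '1' ∧ 1 + (k:Int) > ones then 1 + (k:Int) else ones) = ones := by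
              simp
            have ez : (if ('0':Char) = '0' ∧ 1 + (k:Int) > (if (1:Int) > zeroes then 1 else zeroes)
                  then 1 + (k:Int) else (if (1:Int) > zeroes then 1 else zeroes)) =
                (if 1 + (k:Int) > zeroes then 1 + (k:Int) else zeroes) := by
              simp only [true_and]
              split_ifs <;> omega
            rw [eo, ez]
          rw [hstate]
        rw [pvLoopA]
        simp only [← hk]
        rw [hfold]
        have hz : max ((k : Int) + 1) zeroes = (if 1 + (k : Int) > zeroes then 1 + (k : Int) else zeroes) := by
          split_ifs <;> omega
        rw [hz]
        exact ih (rest.drop k) hdroplen hbin' (some '0') (1 + (k : Int)) ones _ hhead'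
      · subst hc
        have hfold : (('1' : Char) :: rest).foldl pvStepB (prev, run, ones, zeroes) =
            (rest.drop k).foldl pvStepB
              (some '1', 1 + (k : Int),
                (if 1 + (k : Int) > ones then 1 + (k : Int) else ones), zeroes) := by
          have hstep : pvStepB (prev, run, ones, zeroes) '1' =
              (some '1', 1, (if (1:Int) > ones then 1 else ones), zeroes) := by
            simp [pvStepB, hne]
          rw [List.foldl_cons, hstep]
          conv_lhs => rw [hrest]
          rw [List.foldl_append,
            pvFoldB_replicate k '1' 1 (if (1:Int) > ones then 1 else ones) zeroes
              (by intro _; split_ifs <;> omega)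
              (by intro h; exact absurd h (by decide))]
          have hstate :
              ((some '1' : Option Char), 1 + (k : Int),
                (if ('1':Char) = '1' ∧ 1 + (k:Int) > (if (1:Int) > ones then 1 else ones)
                  then 1 + (k:Int) else (if (1:Int) > ones then 1 else ones)),
                (if ('1':Char) = '0' ∧ 1 + (k:Int) > zeroes then 1 + (k:Int) else zeroes)) =
              ((some '1' : Option Char), 1 + (k : Int),
                (if 1 + (k:Int) > ones then 1 + (k:Int) else ones), zeroes) := by
            have eo : (if ('1':Char) = '1' ∧ 1 + (k:Int) > (if (1:Int) > ones then 1 else ones)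
                  then 1 + (k:Int) else (if (1:Int) > ones then 1 else ones)) =
                (if 1 + (k:Int) > ones then 1 + (k:Int) else ones) := by
              simp only [true_and]
              split_ifs <;> omega
            have ez : (if ('1':Char) = '0' ∧ 1 + (k:Int) > zeroes then 1 + (k:Int) else zeroes) = zeroes := by
              simp
            rw [eo, ez]
          rw [hstate]
        rw [pvLoopA]
        simp only [if_neg (by decide : ¬ ('1':Char) = '0'), ← hk]
        rw [hfold]
        have ho : max ones ((k : Int) + 1) = (if 1 + (k : Int) > ones then 1 + (k : Int) else ones) := by
          split_ifs <;> omega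
        rw [ho]
        exact ih (rest.drop k) hdroplen hbin' (some '1') (1 + (k : Int)) _ zeroes hhead'

-- ===== VERDICT (by name: the statement is the Claim_ definition above) =====
theorem LongestContegiousSegment_spec : Claim_equal_LongestContegiousSegment := by
  intro s _ hpre
  have hpre' : ∀ c ∈ s.toList, c = '0' ∨ c = '1' := by
    intro c hc
    simpa using List.all_eq_true.mp hpre c hc
  unfold Spec_LongestContegiousSegment LongestContegiousSegment LongestContegiousSegment_alt
  rw [pvMain s.toList.length s.toList le_rfl hpre' none 0 0 0 (by simp)]
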